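-- pv_equiv track=rewrite | github.com/ndemarco/alphanet | demo_extractor.py | strip_checksum
-- ===== SOURCE A (Python) =====
-- ETX = ']#'   # ASCII Printable End of Text
--
-- def strip_checksum(packet):
--     """
--     If packet ends with ETX + 4 hex digits, it's a checksum.
--     Remove it, and return (stripped_packet, True)
--     Otherwise return (original_packet, False)
--     """
--
--     etx_index = packet.rfind(ETX)
--     if etx_index == -1:
--         return packet, False
--
--     # Everything after ETX
--     suffix = packet[etx_index + len(ETX):]
--     # Verify the suffix is exactly 4 hex digits
--     if len(suffix) == 4 and all(c in "0123456789ABCDEFabcdef" for c in suffix):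
--         return packet[:-4], True
--     else:
--         return packet, False
-- ===== SOURCE B (Python) =====
-- HEX = set("0123456789ABCDEFabcdef")
--
-- def strip_checksum(packet):
--     # Single forward pass (no rfind backward scan): a little DFA tracks the
--     # characters seen since the most recent ']#' marker and whether they are
--     # all hex; the packet carries a checksum iff exactly 4 hex chars follow
--     # the last marker.
--     prev = None
--     seen = False
--     cnt = 0
--     hexok = True
--     for c in packet:
--         if c == '#' and prev == ']':
--             seen, cnt, hexok = True, 0, True
--         elif seen:
--             cnt += 1
--             hexok = hexok and c in HEX
--         prev = c
--     if seen and cnt == 4 and hexok: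
--         return packet[:-4], True
--     return packet, False
-- ===== Notes on version B (the rewrite author's own statement) =====
-- stated objective: alternative
-- what changed: B replaces A's backward rfind scan plus suffix slicing/validation by a single forward pass with a small state machine (last char, chars counted since the most recent ']#' marker, running all-hex flag), deciding the checksum from the final state.
import Mathlib
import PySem

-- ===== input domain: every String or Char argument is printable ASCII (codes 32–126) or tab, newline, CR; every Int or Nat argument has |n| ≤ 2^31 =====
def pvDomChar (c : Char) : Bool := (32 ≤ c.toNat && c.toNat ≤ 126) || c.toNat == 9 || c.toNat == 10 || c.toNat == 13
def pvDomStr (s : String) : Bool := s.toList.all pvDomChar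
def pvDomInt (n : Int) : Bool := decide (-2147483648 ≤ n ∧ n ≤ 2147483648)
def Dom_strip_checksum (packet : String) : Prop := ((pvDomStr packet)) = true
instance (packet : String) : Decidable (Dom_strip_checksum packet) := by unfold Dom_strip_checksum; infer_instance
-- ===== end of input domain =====

-- B replaces A's backward rfind scan plus suffix slicing/validation by a single forward
-- pass with a small state machine; same cost, a genuinely different traversal.

-- ===== PORT A =====
def pvHexA : List Char := "0123456789ABCDEFabcdef".toList

def strip_checksum (packet : String) : String × Bool :=
  let etx_index := PySem.Str.rfind packet "]#"
  if etx_index = -1 then (packet, false)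
  else
    let suffix := PySem.List.slice packet.toList (some (etx_index + 2)) none
    if suffix.length = 4 ∧ suffix.all (fun c => pvHexA.contains c) then
      (String.ofList (PySem.List.slice packet.toList none (some (-4))), true)
    else (packet, false)

-- ===== PORT B =====
def pvHEX : PySem.Set Char := PySem.Set.ofList "0123456789ABCDEFabcdef".toList

-- one loop iteration of Source B: state = (prev, seen, cnt, hexok)
def pvStep (st : Option Char × Bool × Nat × Bool) (c : Char) : Option Char × Bool × Nat × Bool :=
  if c = '#' ∧ st.1 = some ']' then (some c, true, 0, true)
  else if st.2.1 then (some c, st.2.1, st.2.2.1 + 1, st.2.2.2 && PySem.Set.contains pvHEX c)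
  else (some c, st.2.1, st.2.2.1, st.2.2.2)

def strip_checksum_alt (packet : String) : String × Bool :=
  let st := packet.toList.foldl pvStep ((none : Option Char), false, 0, true)
  if st.2.1 = true ∧ st.2.2.1 = 4 ∧ st.2.2.2 = true then
    (String.ofList (PySem.List.slice packet.toList none (some (-4))), true)
  else (packet, false)

-- ===== PRECONDITION & SPEC =====
def Spec_strip_checksum (packet : String) (out : String × Bool) : Prop := out = strip_checksum_alt packet
instance (packet : String) (out : String × Bool) : Decidable (Spec_strip_checksum packet out) := by unfold Spec_strip_checksum; infer_instance

-- ===== CLAIM (what is proved, stated in full; the proofs are below) =====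
def Claim_equal_strip_checksum : Prop := ∀ (packet : String), Dom_strip_checksum packet → Spec_strip_checksum packet (strip_checksum packet)

-- ===== LEMMAS AND PROOFS =====

-- rfind.go returns j when sub occurs at j and nowhere later (up to n)
theorem pv_go_eq_of_max (s sub : List Char) (j n : Nat) (hj : j ≤ n)
    (hp : sub.isPrefixOf (s.drop j) = true)
    (hmax : ∀ i, j < i → i ≤ n → sub.isPrefixOf (s.drop i) = false) :
    PySem.Chars.rfind.go s sub n = (j : Int) := by
  induction n with
  | zero =>
    interval_cases j
    simp only [List.drop_zero] at hp
    simp [PySem.Chars.rfind.go, hp]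
  | succ n ih =>
    by_cases hjn : j = n + 1
    · subst hjn
      simp [PySem.Chars.rfind.go, hp]
    · have hj' : j ≤ n := by omega
      have hlast := hmax (n + 1) (by omega) (le_refl _)
      simp only [PySem.Chars.rfind.go, hlast]
      simp only [Bool.false_eq_true, if_false]
      exact ih hj' (fun i h1 h2 => hmax i h1 (by omega))

-- rfind.go is -1 when sub occurs nowhere (up to n)
theorem pv_go_neg (s sub : List Char) (n : Nat)
    (h : ∀ i, i ≤ n → sub.isPrefixOf (s.drop i) = false) :
    PySem.Chars.rfind.go s sub n = -1 := by
  induction n with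
  | zero =>
    have h0 := h 0 (le_refl _)
    simp only [List.drop_zero] at h0
    simp [PySem.Chars.rfind.go, h0]
  | succ n ih =>
    have hlast := h (n + 1) (le_refl _)
    simp only [PySem.Chars.rfind.go, hlast]
    simp only [Bool.false_eq_true, if_false]
    exact ih (fun i hi => h i (by omega))

-- rfind.go either fails everywhere or returns the LAST occurrence
theorem pv_go_spec (s sub : List Char) (n : Nat) :
    (PySem.Chars.rfind.go s sub n = -1 ∧ ∀ i, i ≤ n → sub.isPrefixOf (s.drop i) = false) ∨
      (∃ j, j ≤ n ∧ PySem.Chars.rfind.go s sub n = (j : Int) ∧ sub.isPrefixOf (s.drop j) = true ∧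
        ∀ i, j < i → i ≤ n → sub.isPrefixOf (s.drop i) = false) := by
  induction n with
  | zero =>
    by_cases hp : sub.isPrefixOf s = true
    · right
      exact ⟨0, le_refl _, by simp [PySem.Chars.rfind.go, hp], by simpa using hp,
        fun i h1 h2 => by omega⟩
    · have hp' : sub.isPrefixOf s = false := by
        revert hp; cases sub.isPrefixOf s <;> simp
      left
      refine ⟨by simp [PySem.Chars.rfind.go, hp'], ?_⟩
      intro i hi
      interval_cases i
      simp [hp']
  | succ n ih =>
    by_cases hp : sub.isPrefixOf (s.drop (n + 1)) = true
    · right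
      exact ⟨n + 1, le_refl _, by simp [PySem.Chars.rfind.go, hp], hp,
        fun i h1 h2 => by omega⟩
    · have hp' : sub.isPrefixOf (s.drop (n + 1)) = false := by
        revert hp; cases sub.isPrefixOf (s.drop (n + 1)) <;> simp
      have hstep : PySem.Chars.rfind.go s sub (n + 1) = PySem.Chars.rfind.go s sub n := by
        simp [PySem.Chars.rfind.go, hp']
      rcases ih with ⟨hgo, hall⟩ | ⟨j, hj, hgo, hocc, hmax⟩
      · left
        refine ⟨by rw [hstep]; exact hgo, ?_⟩
        intro i hi
        by_cases hin : i ≤ n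
        · exact hall i hin
        · have hi1 : i = n + 1 := by omega
          rw [hi1]; exact hp'
      · right
        refine ⟨j, by omega, by rw [hstep]; exact hgo, hocc, ?_⟩
        intro i h1 h2
        by_cases hin : i ≤ n
        · exact hmax i h1 hin
        · have hi1 : i = n + 1 := by omega
          rw [hi1]; exact hp'

-- an occurrence strictly inside t is unaffected by appending one char
theorem pv_occ_within (t : List Char) (c : Char) (i : Nat) (h : i + 2 ≤ t.length) :
    ([']', '#'] : List Char).isPrefixOf ((t ++ [c]).drop i) =
      ([']', '#'] : List Char).isPrefixOf (t.drop i) := by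
  rw [List.drop_append_of_le_length (by omega)]
  rcases hd : t.drop i with _ | ⟨x, r1⟩
  · have hl := congrArg List.length hd
    simp at hl; omega
  · rcases r1 with _ | ⟨y, r⟩
    · have hl := congrArg List.length hd
      simp at hl; omega
    · simp [List.isPrefixOf]

-- near the appended end, an occurrence could only sit at the boundary position
theorem pv_occ_append_high (t : List Char) (c : Char)
    (hb : ¬(c = '#' ∧ t.getLast? = some ']')) (i : Nat)
    (hi : t.length < i + 2) (hi' : i ≤ t.length + 1) :
    ([']', '#'] : List Char).isPrefixOf ((t ++ [c]).drop i) = false := by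
  rcases (by omega : i = t.length + 1 ∨ i = t.length ∨ t.length = i + 1) with h | h | h
  · subst h
    rw [List.drop_eq_nil_of_le (by simp)]
    simp [List.isPrefixOf]
  · subst h
    rw [List.drop_left]
    simp [List.isPrefixOf]
  · rcases List.eq_nil_or_concat t with rfl | ⟨t', x, rfl⟩
    · simp at h
    · have hlen : t'.length = i := by simp at h; omega
      have hdrop : ((t'.concat x) ++ [c]).drop i = [x, c] := by
        rw [List.concat_eq_append, List.append_assoc, ← hlen]
        simp
      rw [hdrop]
      have hx : ¬(x = ']' ∧ c = '#') := by
        intro hxc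
        exact hb ⟨hxc.2, by simp [hxc.1]⟩
      by_cases h1 : x = ']'
      · have h2 : c ≠ '#' := fun hc => hx ⟨h1, hc⟩
        have h2' : ('#' == c) = false := beq_eq_false_iff_ne.mpr (fun he => h2 he.symm)
        simp [List.isPrefixOf, h2']
      · have h1' : (']' == x) = false := beq_eq_false_iff_ne.mpr (fun he => h1 he.symm)
        simp [List.isPrefixOf, h1']

-- how the last-occurrence index evolves when one char is appended
theorem pv_R_append (t : List Char) (c : Char) :
    PySem.Chars.rfind.go (t ++ [c]) [']', '#'] (t.length + 1) =
      if c = '#' ∧ t.getLast? = some ']' then ((t.length - 1 : Nat) : Int)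
      else PySem.Chars.rfind.go t [']', '#'] t.length := by
  split_ifs with hb
  · obtain ⟨hc, hl⟩ := hb
    rcases List.eq_nil_or_concat t with rfl | ⟨t', x, rfl⟩
    · simp at hl
    · have hx : x = ']' := by simpa using hl
      subst hx; subst hc
      have hlen : (t'.concat ']').length - 1 = t'.length := by simp
      rw [hlen]
      apply pv_go_eq_of_max _ _ t'.length _ (by simp only [List.length_concat]; omega)
      · have hd : ((t'.concat ']') ++ ['#']).drop t'.length = [']', '#'] := by
          rw [List.concat_eq_append, List.append_assoc]
          simp
        rw [hd]
        decide
      · intro i h1 h2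
        simp only [List.length_concat] at h2
        rcases (by omega : i = t'.length + 1 ∨ i = t'.length + 2) with h | h
        · subst h
          have hd : ((t'.concat ']') ++ ['#']).drop (t'.length + 1) = ['#'] := by
            rw [List.concat_eq_append]
            have hl1 : (t' ++ [']']).length = t'.length + 1 := by simp
            rw [← hl1, List.drop_left]
          rw [hd]
          simp [List.isPrefixOf]
        · subst h
          rw [List.drop_eq_nil_of_le (by simp)]
          simp [List.isPrefixOf]
  · rcases pv_go_spec t [']', '#'] t.length with ⟨hgo, hall⟩ | ⟨j, hj, hgo, hocc, hmax⟩
    · rw [hgo]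
      apply pv_go_neg
      intro i hi
      by_cases hin : i + 2 ≤ t.length
      · rw [pv_occ_within t c i hin]
        exact hall i (by omega)
      · exact pv_occ_append_high t c hb i (by omega) hi
    · rw [hgo]
      have hocc_len : j + 2 ≤ t.length := by
        have hle := (List.isPrefixOf_iff_prefix.mp hocc).length_le
        simp at hle
        omega
      apply pv_go_eq_of_max _ _ j _ (by omega)
      · rw [pv_occ_within t c j hocc_len]
        exact hocc
      · intro i h1 h2
        by_cases hin : i + 2 ≤ t.length
        · rw [pv_occ_within t c i hin]
          exact hmax i h1 (by omega)
        · exact pv_occ_append_high t c hb i (by omega) h2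

-- pvStep unfolded (without unfolding occurrences inside the fold)
theorem pvStep_eq (st : Option Char × Bool × Nat × Bool) (c : Char) :
    pvStep st c = if c = '#' ∧ st.1 = some ']' then (some c, true, 0, true)
      else if st.2.1 then (some c, st.2.1, st.2.2.1 + 1, st.2.2.2 && PySem.Set.contains pvHEX c)
      else (some c, st.2.1, st.2.2.1, st.2.2.2) := rfl

-- the DFA state after the whole fold, characterised by rfind's result
theorem pv_inv (s : List Char) :
    (List.foldl pvStep ((none : Option Char), false, 0, true) s).1 = s.getLast? ∧
      ((PySem.Chars.rfind.go s [']', '#'] s.length = -1 ∧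
          (List.foldl pvStep ((none : Option Char), false, 0, true) s).2.1 = false) ∨
        (∃ j : Nat, j + 2 ≤ s.length ∧
          PySem.Chars.rfind.go s [']', '#'] s.length = (j : Int) ∧
          (List.foldl pvStep ((none : Option Char), false, 0, true) s).2 =
            (true, s.length - (j + 2),
              (s.drop (j + 2)).all (fun c => PySem.Set.contains pvHEX c)))) := by
  induction s using List.reverseRecOn with
  | nil =>
    refine ⟨rfl, Or.inl ⟨?_, rfl⟩⟩
    simp [PySem.Chars.rfind.go, List.isPrefixOf]
  | append_singleton t c ih =>
    obtain ⟨ih1, ih2⟩ := ih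
    have hfold : List.foldl pvStep ((none : Option Char), false, 0, true) (t ++ [c])
        = pvStep (List.foldl pvStep ((none : Option Char), false, 0, true) t) c := by
      simp [List.foldl_append]
    have hlen : (t ++ [c]).length = t.length + 1 := by simp
    have hR := pv_R_append t c
    by_cases hb : c = '#' ∧ t.getLast? = some ']'
    · have hstep : pvStep (List.foldl pvStep ((none : Option Char), false, 0, true) t) c
          = (some c, true, 0, true) := by
        rw [pvStep_eq, if_pos ⟨hb.1, by rw [ih1]; exact hb.2⟩]
      have ht1 : 1 ≤ t.length := by
        rcases List.eq_nil_or_concat t with rfl | ⟨t', x, rfl⟩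
        · simp at hb
        · simp
      refine ⟨by rw [hfold, hstep]; simp, Or.inr ⟨t.length - 1, by simp; omega, ?_, ?_⟩⟩
      · rw [hlen, hR, if_pos hb]
      · rw [hfold, hstep]
        have h0 : (t ++ [c]).length - (t.length - 1 + 2) = 0 := by simp; omega
        have hdrop : ((t ++ [c]).drop (t.length - 1 + 2)) = [] :=
          List.drop_eq_nil_of_le (by simp; omega)
        rw [h0, hdrop]
        simp
    · have hcond : ¬(c = '#' ∧
          (List.foldl pvStep ((none : Option Char), false, 0, true) t).1 = some ']') := by
        rw [ih1]; exact hb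
      rcases ih2 with ⟨hgo, hseen⟩ | ⟨j, hj2, hgo, htup⟩
      · have hstep : pvStep (List.foldl pvStep ((none : Option Char), false, 0, true) t) c
            = (some c, (List.foldl pvStep ((none : Option Char), false, 0, true) t).2.1,
               (List.foldl pvStep ((none : Option Char), false, 0, true) t).2.2.1,
               (List.foldl pvStep ((none : Option Char), false, 0, true) t).2.2.2) := by
          rw [pvStep_eq, if_neg hcond, if_neg (by rw [hseen]; simp)]
        refine ⟨by rw [hfold, hstep]; simp, Or.inl ⟨?_, by rw [hfold, hstep]; exact hseen⟩⟩
        rw [hlen, hR, if_neg hb]; exact hgo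
      · have hseen : (List.foldl pvStep ((none : Option Char), false, 0, true) t).2.1 = true := by
          rw [htup]
        have hstep : pvStep (List.foldl pvStep ((none : Option Char), false, 0, true) t) c
            = (some c, true, (t.length - (j + 2)) + 1,
               (t.drop (j + 2)).all (fun x => PySem.Set.contains pvHEX x)
                 && PySem.Set.contains pvHEX c) := by
          rw [pvStep_eq, if_neg hcond, if_pos hseen, htup]
        refine ⟨by rw [hfold, hstep]; simp, Or.inr ⟨j, by simp; omega, ?_, ?_⟩⟩
        · rw [hlen, hR, if_neg hb]; exact hgo
        · rw [hfold, hstep]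
          have h1 : (t ++ [c]).length - (j + 2) = (t.length - (j + 2)) + 1 := by simp; omega
          have h2 : (t ++ [c]).drop (j + 2) = t.drop (j + 2) ++ [c] :=
            List.drop_append_of_le_length hj2
          rw [h1, h2]
          simp

-- the two hex alphabets coincide
theorem pv_hex_eq : (fun c => PySem.Set.contains pvHEX c) = (fun c => pvHexA.contains c) := by
  funext c
  have h : (pvHEX : List Char) = pvHexA := by decide
  simp [PySem.Set.contains_eq_listContains, h]

-- ===== VERDICT (by name: the statement is the Claim_ definition above) =====
theorem strip_checksum_spec : Claim_equal_strip_checksum := by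
  intro packet _
  unfold Spec_strip_checksum strip_checksum strip_checksum_alt
  simp only []
  set s : List Char := packet.toList with hs
  have hrf : PySem.Str.rfind packet "]#" = PySem.Chars.rfind.go s [']', '#'] s.length := by
    have hsub : ("]#" : String).toList = [']', '#'] := by decide
    simp [PySem.Str.rfind_eq, PySem.Chars.rfind, hsub, hs]
  obtain ⟨-, h2⟩ := pv_inv s
  rcases h2 with ⟨hR, hseen⟩ | ⟨j, hj2, hR, htup⟩
  · rw [hrf, hR, if_pos rfl, if_neg (by simp [hseen])]
  · rw [hrf, hR, if_neg (by omega : ¬((j : Int) = -1))]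
    have hc2 : ((j : Int) + 2) = ((j + 2 : Nat) : Int) := by push_cast; ring
    rw [hc2, PySem.List.slice_from_natCast, htup]
    simp only [List.length_drop, pv_hex_eq, true_and]
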